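-- pv_equiv track=rewrite | github.com/Bimi1804/Decl.-ASAG | python_files/classes.py | __chain_precedence_check
-- ===== SOURCE A (Python) =====
-- def __chain_precedence_check(act_a,act_b,processed_answer):
--     """
--     Checks if the answer fulfills Chain Precedence[A,B]
--
--     Parameters
--     ----------
--     act_a : str
--         The actual text (word) of activity A
--     act_b : str
--         The actual text (word) of activity B
--     processed_answer : str[0..*]
--         the list of processed words of the answer
--
--     Returns
--     -------
--     True -> If the answer fulfills the constraint
--     False -> If the answer does not fulfill the constraint
--     """
--     # True if B is not in the answer:
--     if act_b not in processed_answer: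
--         return True
--     # False if B is in answer but A is not in answer:
--     if act_b in processed_answer and act_a not in processed_answer:
--         return False
--     checking = processed_answer
--     while act_b in checking:
--         marker_b = checking.index(act_b)
--         # False if B is the first element:
--         if marker_b == 0:
--             return False
--         # False if A is not directly before B:
--         if checking[marker_b-1] != act_a:
--             return False
--         checking.pop(marker_b)
--         checking.pop(checking.index(act_a))
--     return True
-- ===== SOURCE B (Python) =====
-- def __chain_precedence_check(act_a, act_b, processed_answer):
--     # Single left-to-right pass, no mutation (A destructively pops from
--     # processed_answer; B leaves it untouched -- return value is the same).
--     # Invariants replicating A's greedy removal of the leftmost B and the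
--     # leftmost A: every B needs more A's seen than B's seen so far, and at
--     # least one A strictly after the most recent non-A/non-B token.
--     a_seen = 0          # number of act_a tokens seen so far
--     b_seen = 0          # number of act_b tokens seen so far
--     a_at_other = 0      # value of a_seen at the most recent "other" token
--     for tok in processed_answer:
--         if tok == act_b:
--             b_seen += 1
--             if a_seen < b_seen or a_seen <= a_at_other:
--                 return False
--         elif tok == act_a:
--             a_seen += 1
--         else:
--             a_at_other = a_seen
--     return True
-- ===== Notes on version B (the rewrite author's own statement) =====
-- stated objective: alternative
-- what changed: Replaces A's destructive loop (repeatedly find the first B, check its predecessor, pop that B and the first A from the list) by a single non-mutating left-to-right pass that keeps three counters: A-tokens seen, B-tokens seen, and the A-count at the most recent token that is neither A nor B.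
import Mathlib
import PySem

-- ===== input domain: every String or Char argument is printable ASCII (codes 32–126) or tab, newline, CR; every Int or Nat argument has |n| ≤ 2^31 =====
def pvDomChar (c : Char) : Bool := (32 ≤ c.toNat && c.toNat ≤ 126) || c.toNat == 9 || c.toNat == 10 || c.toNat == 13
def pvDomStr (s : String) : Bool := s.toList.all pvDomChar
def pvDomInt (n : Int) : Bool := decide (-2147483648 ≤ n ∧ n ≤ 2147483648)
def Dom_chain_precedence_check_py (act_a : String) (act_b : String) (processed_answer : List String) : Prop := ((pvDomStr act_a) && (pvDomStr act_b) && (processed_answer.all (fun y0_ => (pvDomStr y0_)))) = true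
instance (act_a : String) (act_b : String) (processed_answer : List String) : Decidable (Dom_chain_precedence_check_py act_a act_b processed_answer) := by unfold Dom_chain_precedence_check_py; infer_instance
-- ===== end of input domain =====

-- B replaces A's destructive find-and-remove loop by one non-mutating counting pass (objective: alternative).
-- Note: Python A mutates processed_answer in place (pops elements); the equivalence proved here is about the return value only.

-- ===== PORT A =====
-- the while-loop of A: repeatedly locate the first act_b, check it is not first and is
-- directly preceded by act_a, then pop that act_b and the first act_a
def chainLoopA (act_a : String) (act_b : String) (checking : List String) : Bool :=
  match _h : PySem.List.index? checking act_b with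
  | none => true                                   -- while condition 'act_b in checking' false
  | some marker_b =>
    if marker_b = 0 then false
    else if PySem.List.pyGet? checking ((marker_b : Int) - 1) ≠ some act_a then false
    else
      match _h2 : PySem.List.pop? checking (marker_b : Int) with
      | none => false                              -- unreachable: index? guarantees marker_b < length
      | some (_, rest) =>
        match PySem.List.index? rest act_a with
        | none => false                            -- unreachable: act_a sits at marker_b - 1 and survives the pop
        | some ia =>
          match _h3 : PySem.List.pop? rest (ia : Int) with
          | none => false                          -- unreachable: ia < rest.length
          | some (_, rest2) => chainLoopA act_a act_b rest2
  termination_by checking.length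
  decreasing_by
    have e1 := PySem.List.length_of_pop?_eq_some _ _h2
    have e2 := PySem.List.length_of_pop?_eq_some _ _h3
    simp at e1 e2
    omega

def chain_precedence_check_py (act_a : String) (act_b : String) (processed_answer : List String) : Bool :=
  if ¬ processed_answer.contains act_b then true
  else if processed_answer.contains act_b ∧ ¬ processed_answer.contains act_a then false
  else chainLoopA act_a act_b processed_answer

-- ===== PORT B =====
-- single pass with three counters (see Source B)
def chainAltLoop (act_a : String) (act_b : String) (l : List String) (aSeen bSeen aAtOther : Int) : Bool :=
  match l with
  | [] => true
  | tok :: rest =>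
    if tok == act_b then
      if aSeen < bSeen + 1 ∨ aSeen ≤ aAtOther then false
      else chainAltLoop act_a act_b rest aSeen (bSeen + 1) aAtOther
    else if tok == act_a then chainAltLoop act_a act_b rest (aSeen + 1) bSeen aAtOther
    else chainAltLoop act_a act_b rest aSeen bSeen aSeen

def chain_precedence_check_py_alt (act_a : String) (act_b : String) (processed_answer : List String) : Bool :=
  chainAltLoop act_a act_b processed_answer 0 0 0

-- ===== PRECONDITION & SPEC =====
def Spec_chain_precedence_check_py (act_a : String) (act_b : String) (processed_answer : List String) (out : Bool) : Prop := out = chain_precedence_check_py_alt act_a act_b processed_answer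
instance (act_a : String) (act_b : String) (processed_answer : List String) (out : Bool) : Decidable (Spec_chain_precedence_check_py act_a act_b processed_answer out) := by unfold Spec_chain_precedence_check_py; infer_instance

-- ===== CLAIM (what is proved, stated in full; the proofs are below) =====
def Claim_equal_chain_precedence_check_py : Prop := ∀ (act_a : String) (act_b : String) (processed_answer : List String), Dom_chain_precedence_check_py act_a act_b processed_answer → Spec_chain_precedence_check_py act_a act_b processed_answer (chain_precedence_check_py act_a act_b processed_answer)

-- ===== LEMMAS AND PROOFS =====

-- one unfolding step of the alt loop
theorem alt_cons (aA aB t : String) (r : List String) (a b o : Int) :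
    chainAltLoop aA aB (t :: r) a b o =
      (if (t == aB) = true then (if a < b + 1 ∨ a ≤ o then false else chainAltLoop aA aB r a (b + 1) o)
       else if (t == aA) = true then chainAltLoop aA aB r (a + 1) b o
       else chainAltLoop aA aB r a b a) := rfl

-- state functions: aSeen and aAtOther after processing an act_b-free prefix
def stA (act_a : String) : List String → Int → Int
  | [], s => s
  | t :: r, s => stA act_a r (if t == act_a then s + 1 else s)

def stO (act_a : String) : List String → Int → Int → Int
  | [], _, o => o
  | t :: r, s, o => if t == act_a then stO act_a r (s + 1) o else stO act_a r s s

theorem stA_shift (a : String) (r : List String) : ∀ s : Int, stA a r (s + 1) = stA a r s + 1 := by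
  induction r with
  | nil => intro s; simp [stA]
  | cons t r ih =>
    intro s
    by_cases h : (t == a) = true
    · simp only [stA, h, if_true]
      exact ih (s + 1)
    · simp only [stA, h]
      exact ih s

theorem stA_nonneg (a : String) (r : List String) : ∀ s : Int, 0 ≤ s → 0 ≤ stA a r s := by
  induction r with
  | nil => intro s hs; simpa [stA]
  | cons t r ih =>
    intro s hs; by_cases h : (t == a) = true <;> simp [stA, h] <;> apply ih <;> omega

theorem stO_shift (a : String) (r : List String) : ∀ s o : Int, stO a r (s + 1) (o + 1) = stO a r s o + 1 := by
  induction r with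
  | nil => intro s o; simp [stO]
  | cons t r ih =>
    intro s o
    by_cases h : (t == a) = true
    · simp only [stO, h, if_true]
      exact ih (s + 1) o
    · simp only [stO, h]
      exact ih s s

theorem stO_nonneg (a : String) (r : List String) : ∀ s o : Int, 0 ≤ s → 0 ≤ o → 0 ≤ stO a r s o := by
  induction r with
  | nil => intro s o _ ho; simpa [stO]
  | cons t r ih =>
    intro s o hs ho
    by_cases h : (t == a) = true <;> simp [stO, h]
    · exact ih (s + 1) o (by omega) ho
    · exact ih s s hs hs

theorem stO_bump (a : String) (r : List String) : ∀ s o : Int,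
    stO a r (s + 1) o = stO a r s o + 1 ∨ (stO a r (s + 1) o = o ∧ stO a r s o = o) := by
  induction r with
  | nil => intro s o; right; simp [stO]
  | cons t r ih =>
    intro s o; by_cases h : (t == a) = true
    · simpa [stO, h] using ih (s + 1) o
    · left; simpa [stO, h] using stO_shift a r s s

theorem stO_le (a : String) (r : List String) : ∀ s o : Int, o ≤ s → stO a r s o ≤ stA a r s := by
  induction r with
  | nil => intro s o h; simpa [stO, stA]
  | cons t r ih =>
    intro s o h; by_cases hb : (t == a) = true <;> simp [stO, stA, hb]
    · exact ih (s + 1) o (by omega)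
    · exact ih s s le_rfl

theorem stA_append (a : String) (P Q : List String) : ∀ s : Int, stA a (P ++ Q) s = stA a Q (stA a P s) := by
  induction P with
  | nil => intro s; simp [stA]
  | cons t r ih => intro s; simp [stA, ih]

theorem stO_append (a : String) (P Q : List String) : ∀ s o : Int,
    stO a (P ++ Q) s o = stO a Q (stA a P s) (stO a P s o) := by
  induction P with
  | nil => intro s o; simp [stA, stO]
  | cons t r ih =>
    intro s o; by_cases h : (t == a) = true <;> simp [stA, stO, h, ih]

theorem stA_erase (a : String) (r : List String) (hm : a ∈ r) : ∀ s : Int,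
    stA a (r.erase a) s = stA a r s - 1 := by
  induction r with
  | nil => cases hm
  | cons t r ih =>
    intro s
    by_cases h : (t == a) = true
    · simp [List.erase_cons, h, stA, stA_shift]
    · have hmr : a ∈ r := by
        rcases List.mem_cons.1 hm with h' | h'
        · subst h'; simp at h
        · exact h'
      simp [h, stA, ih hmr]

-- removing the first act_a from a prefix lowers aAtOther by one, unless no act_a
-- occurred before the last non-act_a token (then aAtOther stays ≤ the initial aSeen)
theorem stO_erase (a : String) (r : List String) (hm : a ∈ r) : ∀ s o : Int, o ≤ s →
    stO a (r.erase a) s o = stO a r s o - 1 ∨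
      (stO a (r.erase a) s o = stO a r s o ∧ stO a r s o ≤ s) := by
  induction r with
  | nil => cases hm
  | cons t r ih =>
    intro s o hso
    by_cases h : (t == a) = true
    · simp only [List.erase_cons, h, if_true, stO]
      rcases stO_bump a r s o with hb | ⟨hb1, hb2⟩
      · left; omega
      · right; exact ⟨by omega, by omega⟩
    · have hmr : a ∈ r := by
        rcases List.mem_cons.1 hm with h' | h'
        · subst h'; simp at h
        · exact h'
      simp [h, stO]
      exact ih hmr s s le_rfl

-- processing an act_b-free prefix of the alt loop
theorem alt_append (aA aB : String) (P : List String) (hP : aB ∉ P) : ∀ (w : List String) (s bs o : Int),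
    chainAltLoop aA aB (P ++ w) s bs o = chainAltLoop aA aB w (stA aA P s) bs (stO aA P s o) := by
  induction P with
  | nil => intro w s bs o; simp [stA, stO]
  | cons t r ih =>
    intro w s bs o
    have ht : ¬ (t == aB) = true := by
      intro h; exact hP (by simp [eq_of_beq h])
    have hr : aB ∉ r := fun h => hP (by simp [h])
    rw [List.cons_append, alt_cons, if_neg ht]
    by_cases h : (t == aA) = true
    · rw [if_pos h, ih hr w (s + 1) bs o]
      simp [stA, stO, h]
    · rw [if_neg h, ih hr w s bs s]
      simp [stA, stO, h]

theorem alt_noB (aA aB : String) (l : List String) (hl : aB ∉ l) : ∀ s bs o : Int,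
    chainAltLoop aA aB l s bs o = true := by
  intro s bs o
  have := alt_append aA aB l hl [] s bs o
  simpa [chainAltLoop] using this

-- the shift lemma: both counters one lower, aAtOther one lower (or unchanged below bSeen)
theorem alt_shift (aA aB : String) (w : List String) : ∀ a1 b1 o1 o2 : Int,
    (o2 = o1 - 1 ∨ (o2 = o1 ∧ o1 < b1)) →
    chainAltLoop aA aB w a1 b1 o1 = chainAltLoop aA aB w (a1 - 1) (b1 - 1) o2 := by
  induction w with
  | nil => intro a1 b1 o1 o2 _; simp [chainAltLoop]
  | cons t r ih =>
    intro a1 b1 o1 o2 hrel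
    rw [alt_cons, alt_cons]
    by_cases hb : (t == aB) = true
    · rw [if_pos hb, if_pos hb]
      have hcond : (a1 < b1 + 1 ∨ a1 ≤ o1) ↔ (a1 - 1 < b1 - 1 + 1 ∨ a1 - 1 ≤ o2) := by
        rcases hrel with h | ⟨h1, h2⟩ <;> omega
      by_cases hc : a1 < b1 + 1 ∨ a1 ≤ o1
      · rw [if_pos hc, if_pos (hcond.1 hc)]
      · rw [if_neg hc, if_neg (fun h => hc (hcond.2 h))]
        rw [show b1 - 1 + 1 = (b1 + 1) - 1 by omega]
        apply ih
        rcases hrel with h | ⟨h1, h2⟩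
        · left; exact h
        · right; exact ⟨h1, by omega⟩
    · rw [if_neg hb, if_neg hb]
      by_cases ha : (t == aA) = true
      · rw [if_pos ha, if_pos ha, show a1 - 1 + 1 = (a1 + 1) - 1 by omega]
        exact ih (a1 + 1) b1 o1 o2 hrel
      · rw [if_neg ha, if_neg ha]
        exact ih a1 b1 a1 (a1 - 1) (Or.inl rfl)

-- the main loop equivalence, by strong induction on the list length
theorem loopA_eq (aA aB : String) : ∀ (n : Nat) (l : List String), l.length ≤ n →
    chainLoopA aA aB l = chainAltLoop aA aB l 0 0 0 := by
  intro n
  induction n with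
  | zero =>
    intro l hl
    have : l = [] := List.eq_nil_of_length_eq_zero (Nat.le_zero.1 hl)
    subst this
    rw [chainLoopA.eq_def]
    have hnone : PySem.List.index? ([] : List String) aB = none :=
      (PySem.List.index?_eq_none_iff _ _).2 (by simp)
    rw [hnone]
    simp [chainAltLoop]
  | succ n ih =>
    intro l hl
    rw [chainLoopA.eq_def]
    cases hidx : PySem.List.index? l aB with
    | none =>
      have : aB ∉ l := (PySem.List.index?_eq_none_iff _ _).1 hidx
      rw [alt_noB aA aB l this]
    | some m =>
      obtain ⟨P, suf, hsplit, hlen, hnmem⟩ := (PySem.List.index?_eq_some_iff l aB m).1 hidx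
      subst hsplit
      simp only []
      by_cases hm0 : m = 0
      · subst hm0
        have hP : P = [] := List.eq_nil_of_length_eq_zero hlen
        subst hP
        rw [if_pos rfl, List.nil_append, alt_cons, if_pos (by simp), if_pos (by left; omega)]
      · rcases (List.eq_nil_or_concat P) with hPnil | ⟨Q, c, hQ⟩
        · subst hPnil; simp at hlen; omega
        · rw [List.concat_eq_append] at hQ
          subst hQ
          rw [if_neg hm0]
          have hgetc : PySem.List.pyGet? (Q ++ [c] ++ aB :: suf) ((m : Int) - 1) = some c := by
            have hcast : ((m : Int) - 1) = ((Q.length : Nat) : Int) := by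
              simp at hlen; omega
            rw [hcast, show Q ++ [c] ++ aB :: suf = Q ++ (c :: aB :: suf) by simp]
            exact PySem.List.pyGet?_append_length Q (aB :: suf) c
          rw [hgetc]
          have hnmemQ : aB ∉ Q ++ [c] := hnmem
          by_cases hca : c = aA
          · -- predecessor is act_a: A pops the first aB and the first aA and recurses
            have hca2 : aA = c := hca.symm
            subst hca2
            rw [if_neg (by simp)]
            have hmlt : m < (Q ++ [aA] ++ aB :: suf).length := by simp at hlen ⊢; omega
            rw [PySem.List.pop?_natCast _ _ hmlt]
            simp only []
            have herase : (Q ++ [aA] ++ aB :: suf).eraseIdx m = (Q ++ [aA]) ++ suf := by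
              have hm' : m = (Q ++ [aA]).length := hlen.symm
              rw [hm', List.eraseIdx_append_of_length_le (by simp) _]
              simp
            rw [herase]
            have hmemA : aA ∈ Q ++ [aA] := by simp
            rw [PySem.List.index?_append_of_mem suf hmemA]
            cases hia : PySem.List.index? (Q ++ [aA]) aA with
            | none => exact absurd ((PySem.List.index?_eq_none_iff _ _).1 hia) (by simpa using hmemA)
            | some k =>
              simp only []
              obtain ⟨hk, _, _⟩ := PySem.List.getElem_of_index?_eq_some hia
              have hklt : k < ((Q ++ [aA]) ++ suf).length := by simp at hk ⊢; omega
              rw [PySem.List.pop?_natCast _ _ hklt]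
              simp only []
              have hkidx : List.idxOf aA (Q ++ [aA]) = k := by
                have h1 := PySem.List.index?_eq_idxOf? (Q ++ [aA]) aA
                rw [hia] at h1
                have h2 := List.idxOf_eq_getD_idxOf? (a := aA) (l := Q ++ [aA])
                rw [← h1] at h2
                simpa using h2
              have her2 : ((Q ++ [aA]) ++ suf).eraseIdx k = ((Q ++ [aA]).erase aA) ++ suf := by
                rw [List.eraseIdx_append_of_lt_length hk, ← hkidx, List.eraseIdx_idxOf_eq_erase]
              rw [her2]
              have hlen2 : (((Q ++ [aA]).erase aA) ++ suf).length ≤ n := by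
                have hle := List.length_erase_of_mem hmemA
                simp only [List.length_append] at hl ⊢
                simp only [List.length_cons] at hl
                rw [hle]
                simp at hl ⊢
                omega
              rw [ih _ hlen2]
              -- both sides are now alt runs; relate them through the prefix state
              have hQAnB' : aB ∉ (Q ++ [aA]).erase aA := fun h => hnmemQ (List.mem_of_mem_erase h)
              rw [show (Q ++ [aA]) ++ aB :: suf = (Q ++ [aA]) ++ (aB :: suf) from rfl,
                  alt_append aA aB (Q ++ [aA]) hnmemQ (aB :: suf) 0 0 0,
                  alt_append aA aB ((Q ++ [aA]).erase aA) hQAnB' suf 0 0 0]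
              set A1 := stA aA (Q ++ [aA]) 0 with hA1
              set O1 := stO aA (Q ++ [aA]) 0 0 with hO1
              have hA1v : A1 = stA aA Q 0 + 1 := by
                rw [hA1, stA_append]; simp [stA]
              have hO1v : O1 = stO aA Q 0 0 := by
                rw [hO1, stO_append]; simp [stO]
              have hA1pos : 1 ≤ A1 := by
                have := stA_nonneg aA Q 0 le_rfl; omega
              have hO1lt : O1 < A1 := by
                have := stO_le aA Q 0 0 le_rfl; omega
              have hOnn : 0 ≤ O1 := by
                rw [hO1v]; exact stO_nonneg aA Q 0 0 le_rfl le_rfl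
              have hpass : ¬ ((A1 : Int) < 0 + 1 ∨ A1 ≤ O1) := by omega
              rw [alt_cons, if_pos (by simp), if_neg hpass]
              rw [stA_erase aA (Q ++ [aA]) hmemA 0]
              rcases stO_erase aA (Q ++ [aA]) hmemA 0 0 le_rfl with he | ⟨he1, he2⟩
              · rw [he, ← hA1, ← hO1]
                have h := alt_shift aA aB suf A1 1 O1 (O1 - 1) (Or.inl rfl)
                norm_num at h ⊢
                exact h.symm
              · rw [he1, ← hA1, ← hO1]
                have h := alt_shift aA aB suf A1 1 O1 O1 (Or.inr ⟨rfl, by omega⟩)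
                norm_num at h ⊢
                exact h.symm
          · -- predecessor is not act_a: both sides are false
            rw [if_pos (by simp [hca])]
            rw [show Q ++ [c] ++ aB :: suf = (Q ++ [c]) ++ (aB :: suf) from rfl,
                alt_append aA aB (Q ++ [c]) hnmemQ (aB :: suf) 0 0 0]
            have hcA : ¬ (c == aA) = true := fun h => hca (eq_of_beq h)
            have hOA : stO aA (Q ++ [c]) 0 0 = stA aA (Q ++ [c]) 0 := by
              rw [stO_append, stA_append]
              simp [stO, stA, hcA]
            rw [alt_cons, if_pos (by simp), if_pos (by rw [hOA]; right; exact le_refl _)]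

theorem alt_false_of_no_a (aA aB : String) (l : List String) (hB : aB ∈ l) (hA : aA ∉ l) :
    ∀ s bs o : Int, s ≤ bs → chainAltLoop aA aB l s bs o = false := by
  induction l with
  | nil => cases hB
  | cons t r ih =>
    intro s bs o hle
    by_cases hb : (t == aB) = true
    · rw [alt_cons, if_pos hb, if_pos (Or.inl (by omega))]
    · have ha : ¬ (t == aA) = true := by
        intro h; exact hA (by simp [eq_of_beq h])
      have hBr : aB ∈ r := by
        rcases List.mem_cons.1 hB with h | h
        · subst h; simp at hb
        · exact h
      rw [alt_cons, if_neg hb, if_neg ha]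
      exact ih hBr (fun h => hA (by simp [h])) s bs s hle

-- ===== VERDICT (by name: the statement is the Claim_ definition above) =====
theorem chain_precedence_check_py_spec : Claim_equal_chain_precedence_check_py := by
  intro aA aB l _
  unfold Spec_chain_precedence_check_py chain_precedence_check_py chain_precedence_check_py_alt
  by_cases hB : aB ∈ l
  · by_cases hA : aA ∈ l
    · rw [if_neg (by simp [hB]), if_neg (by simp [hA])]
      exact loopA_eq aA aB l.length l le_rfl
    · rw [if_neg (by simp [hB]), if_pos (by simp [hB, hA])]
      exact (alt_false_of_no_a aA aB l hB hA 0 0 0 le_rfl).symm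
  · rw [if_pos (by simp [hB])]
    exact (alt_noB aA aB l hB 0 0 0).symm
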